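-- pv_equiv track=rewrite | github.com/ChandlerKenworthy/Y4RareDecayProject | code/dataflow.py | add_preselection_df_prefix
-- ===== SOURCE A (Python) =====
-- def add_preselection_df_prefix(boolean_mask, prefix):
--     """
--     Add the dataframe wrappers around the relevant parts of the boolean
--     mask that performs the preselection. That is wrap feature names in
--     quotation and the dataframe identifier
--
--     Parameters
--     ----------
--     boolean_mask : string
--         A Pythonic friendly string that is a singular or set of logical
--         operators with feature names as they are found in the tuples
--     prefix : string
--         The identifer for the dataframe that the given boolean mask
--         will be applied upon
--
--     Returns
--     -------
--     string
--         The same boolean mask provided but with feature names wrapped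
--         appropriately so that eval can be used
--     array_like
--         A list of all features that are needed to evaluate the provided
--         boolean mask
--     """
--
--     preselection_features = []
--     begin, end = False, False
--     begin_position, end_position = 0, 0
--     updated_mask = ''
--
--     for i, char in enumerate(boolean_mask):
--         updated_mask += char
--         # Add the character to the current feature name
--         if char == ' ' and not begin:
--             # The beginning of a feature is when there is a space
--             updated_mask = updated_mask[:-1]
--             # Remove the space character added to the string
--             updated_mask += f"self.{prefix}['"
--             # This is the start of a new feature so add the appropriate prefix
--             begin_position = i
--             begin = True
--             # Set the begin position to the current position and update
--             # the begin variable to show we have a beginning position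
--         elif char == ' ' and begin:
--             # If a beginning position already exists this must be an end point
--             updated_mask = updated_mask[:-1]
--             # Remove the space character from the end of the string
--             updated_mask += "']"
--             # Add the closing bracket to match the dataframe wrapper
--             end_position = i
--             end = True
--             # Set the end position and update the end variable to be true
--         if begin and end:
--             # We have both a begin and end point
--             preselection_features.append(boolean_mask[begin_position + 1:end_position])
--             begin, end = False, False
--             # Reset the beginning and ending flags
--
--     preselection_features = list(dict.fromkeys(preselection_features))
--     # Remove all duplicates
--
--     return updated_mask, preselection_features
-- ===== SOURCE B (Python) =====
-- def add_preselection_df_prefix(boolean_mask, prefix):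
--     # Split on single spaces: spaces alternate open/close of a feature name.
--     first, *gaps = boolean_mask.split(' ')
--     open_tok = "self." + prefix + "['"
--     mask = first
--     features = []
--     i = 0
--     while i + 1 < len(gaps):
--         mask += open_tok + gaps[i] + "']" + gaps[i + 1]
--         features.append(gaps[i])
--         i += 2
--     if i < len(gaps):
--         mask += open_tok + gaps[i]
--     return mask, list(dict.fromkeys(features))
-- ===== Notes on version B (the rewrite author's own statement) =====
-- stated objective: simpler
-- what changed: Replaces A's character-by-character state machine (begin/end flags, begin/end positions, per-character string slicing) with one split(' ') followed by a pair-at-a-time pass over the post-space segments.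
import Mathlib
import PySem

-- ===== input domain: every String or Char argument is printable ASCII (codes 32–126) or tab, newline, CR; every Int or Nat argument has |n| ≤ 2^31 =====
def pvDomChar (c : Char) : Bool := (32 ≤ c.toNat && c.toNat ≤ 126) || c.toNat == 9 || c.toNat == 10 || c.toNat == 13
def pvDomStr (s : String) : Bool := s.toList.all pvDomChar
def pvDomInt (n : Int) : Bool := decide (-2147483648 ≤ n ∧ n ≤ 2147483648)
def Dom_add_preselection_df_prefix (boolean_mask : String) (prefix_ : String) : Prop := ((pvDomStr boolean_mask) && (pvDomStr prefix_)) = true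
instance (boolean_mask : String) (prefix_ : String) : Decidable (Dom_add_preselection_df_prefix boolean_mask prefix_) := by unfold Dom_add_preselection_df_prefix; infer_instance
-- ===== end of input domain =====

-- B replaces A's character-by-character flag/position state machine by split-on-space
-- then a pair-at-a-time pass over the gaps (objective: simpler); return values are equal.

-- ===== PORT A =====
-- A's loop body; state = (preselection_features, begin, end, begin_position, end_position, updated_mask)
-- (strings carried as List Char, converted once at the end)
def pvAStep (bm : List Char) (opn : List Char)
    (st : List (List Char) × Bool × Bool × Int × Int × List Char) (ic : Int × Char) :
    List (List Char) × Bool × Bool × Int × Int × List Char :=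
  let feats := st.1
  let begin_ := st.2.1
  let end_ := st.2.2.1
  let bpos := st.2.2.2.1
  let epos := st.2.2.2.2.1
  let mask := st.2.2.2.2.2
  let i := ic.1
  let ch := ic.2
  let mask1 := mask ++ [ch]                     -- updated_mask += char
  let t :=
    if ch = ' ' ∧ begin_ = false then
      -- updated_mask = updated_mask[:-1]; updated_mask += f"self.{prefix}['"; begin_position = i; begin = True
      (PySem.List.slice mask1 none (some (-1)) ++ opn, true, end_, i, epos)
    else if ch = ' ' ∧ begin_ = true then
      -- updated_mask = updated_mask[:-1]; updated_mask += "']"; end_position = i; end = True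
      (PySem.List.slice mask1 none (some (-1)) ++ "']".toList, begin_, true, bpos, i)
    else
      (mask1, begin_, end_, bpos, epos)
  let mask2 := t.1
  let begin2 := t.2.1
  let end2 := t.2.2.1
  let bpos2 := t.2.2.2.1
  let epos2 := t.2.2.2.2
  if begin2 = true ∧ end2 = true then
    -- preselection_features.append(boolean_mask[begin_position + 1:end_position]); reset flags
    (feats ++ [PySem.List.slice bm (some (bpos2 + 1)) (some epos2)], false, false, bpos2, epos2, mask2)
  else
    (feats, begin2, end2, bpos2, epos2, mask2)

def add_preselection_df_prefix (boolean_mask : String) (prefix_ : String) : String × List String :=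
  let bm := boolean_mask.toList
  let opn := "self.".toList ++ prefix_.toList ++ "['".toList
  let st := (PySem.List.enumerate bm 0).foldl (pvAStep bm opn) ([], false, false, 0, 0, [])
  (String.ofList st.2.2.2.2.2, (PySem.List.dedup st.1).map String.ofList)

-- ===== PORT B =====
-- B's while loop: consume the post-space segments ("gaps") two at a time
def pvBLoop (opn : List Char) (mask : List Char) (feats : List (List Char)) :
    List (List Char) → List Char × List (List Char)
  | x :: y :: rest => pvBLoop opn (mask ++ opn ++ x ++ "']".toList ++ y) (feats ++ [x]) rest
  | [x] => (mask ++ opn ++ x, feats)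
  | [] => (mask, feats)

def add_preselection_df_prefix_alt (boolean_mask : String) (prefix_ : String) : String × List String :=
  let opn := "self.".toList ++ prefix_.toList ++ "['".toList
  match PySem.Chars.splitOn boolean_mask.toList [' '] with
  | [] => ("", [])   -- unreachable: str.split(' ') never returns an empty list
  | first :: gaps =>
      let r := pvBLoop opn first [] gaps
      (String.ofList r.1, (PySem.List.dedup r.2).map String.ofList)

-- ===== PRECONDITION & SPEC =====
def Spec_add_preselection_df_prefix (boolean_mask : String) (prefix_ : String) (out : String × List String) : Prop := out = add_preselection_df_prefix_alt boolean_mask prefix_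
instance (boolean_mask : String) (prefix_ : String) (out : String × List String) : Decidable (Spec_add_preselection_df_prefix boolean_mask prefix_ out) := by unfold Spec_add_preselection_df_prefix; infer_instance

-- ===== CLAIM (what is proved, stated in full; the proofs are below) =====
def Claim_equal_add_preselection_df_prefix : Prop := ∀ (boolean_mask : String) (prefix_ : String), Dom_add_preselection_df_prefix boolean_mask prefix_ → Spec_add_preselection_df_prefix boolean_mask prefix_ (add_preselection_df_prefix boolean_mask prefix_)

-- ===== LEMMAS AND PROOFS =====

-- s.split(' ') as a structural recursion on the character list
def pvSplit : List Char → List (List Char)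
  | [] => [[]]
  | c :: r =>
    if c = ' ' then [] :: pvSplit r
    else
      match pvSplit r with
      | [] => [[c]]        -- unreachable
      | h :: t => (c :: h) :: t

theorem pvSplit_ne_nil (cs : List Char) : pvSplit cs ≠ [] := by
  cases cs with
  | nil => simp [pvSplit]
  | cons c r =>
    simp only [pvSplit]
    split_ifs
    · simp
    · cases h : pvSplit r <;> simp

theorem pvSplitOn_go_eq (fuel : Nat) : ∀ (l cur : List Char) (acc : List (List Char)),
    l.length < fuel →
    PySem.Chars.splitOn.go [' '] fuel l cur acc =
      acc.reverse ++ (cur.reverse ++ (pvSplit l).headI) :: (pvSplit l).tail := by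
  induction fuel with
  | zero => intro l cur acc h; omega
  | succ f ih =>
    intro l cur acc h
    cases l with
    | nil =>
      rw [PySem.Chars.splitOn.go]
      · simp [pvSplit]
      · omega
    | cons c rest =>
      rw [PySem.Chars.splitOn.go]
      have hpre : [' '].isPrefixOf (c :: rest) = (c == ' ') := by
        simp [List.isPrefixOf, Bool.and_comm, BEq.comm]
      rw [hpre]
      by_cases hc : c = ' '
      · subst hc
        simp only [BEq.rfl, if_pos]
        have hdrop : List.drop [' '].length (' ' :: rest) = rest := by simp
        rw [hdrop, ih rest [] (cur.reverse :: acc) (by simpa using Nat.lt_of_succ_lt_succ h)]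
        simp [pvSplit]
        cases hs : pvSplit rest with
        | nil => exact absurd hs (pvSplit_ne_nil rest)
        | cons hh tt => simp
      · rw [if_neg (by simp [hc])]
        rw [ih rest (c :: cur) acc (by simpa using Nat.lt_of_succ_lt_succ h)]
        cases hs : pvSplit rest with
        | nil => exact absurd hs (pvSplit_ne_nil rest)
        | cons hh tt => simp [pvSplit, hc, hs]

theorem pvSplitOn_eq (cs : List Char) : PySem.Chars.splitOn cs [' '] = pvSplit cs := by
  have h := pvSplitOn_go_eq (cs.length + 1) cs [] [] (by omega)
  unfold PySem.Chars.splitOn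
  rw [h]
  have := pvSplit_ne_nil cs
  cases hs : pvSplit cs with
  | nil => exact absurd hs this
  | cons h t => simp

-- the mask appended by A from a list of space-separated parts, starting with flag b
-- (b = true: inside a feature name, the next space closes it)
def pvMx (opn : List Char) : Bool → List (List Char) → List Char
  | _, [] => []
  | b, p :: ps =>
    match ps with
    | [] => p
    | _ :: _ => p ++ (if b then "']".toList else opn) ++ pvMx opn (!b) ps

-- the features appended by A; cur = characters already consumed of the current feature
def pvFx : Bool → List Char → List (List Char) → List (List Char)
  | _, _, [] => []
  | b, cur, p :: ps =>
    match ps with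
    | [] => []
    | _ :: _ => if b then (cur ++ p) :: pvFx false [] ps else pvFx true [] ps

-- B's contributions from the gap list
def pvBmask (opn : List Char) : List (List Char) → List Char
  | [] => []
  | [x] => opn ++ x
  | x :: y :: r => opn ++ x ++ "']".toList ++ y ++ pvBmask opn r

def pvBfeats : List (List Char) → List (List Char)
  | [] => []
  | [_] => []
  | x :: _ :: r => x :: pvBfeats r

theorem pvBLoop_eq (opn : List Char) : ∀ (gaps : List (List Char)) (mask : List Char) (feats : List (List Char)),
    pvBLoop opn mask feats gaps = (mask ++ pvBmask opn gaps, feats ++ pvBfeats gaps) := by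
  intro gaps
  induction gaps using pvBfeats.induct with
  | case1 => intro mask feats; simp [pvBLoop, pvBmask, pvBfeats]
  | case2 x => intro mask feats; simp [pvBLoop, pvBmask, pvBfeats]
  | case3 x y r ih => intro mask feats; simp [pvBLoop, pvBmask, pvBfeats, ih]

theorem pvMx_true_eq (opn : List Char) : ∀ (gaps : List (List Char)), gaps ≠ [] →
    opn ++ pvMx opn true gaps = pvBmask opn gaps := by
  intro gaps
  induction gaps using pvBfeats.induct with
  | case1 => intro h; exact absurd rfl h
  | case2 x => intro _; simp [pvMx, pvBmask]
  | case3 x y r ih =>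
    intro _
    cases r with
    | nil => simp [pvMx, pvBmask]
    | cons z r' => simp [pvMx, pvBmask, ← ih (by simp)]

theorem pvMx_false_eq (opn : List Char) (p : List Char) (gaps : List (List Char)) :
    pvMx opn false (p :: gaps) = p ++ pvBmask opn gaps := by
  cases gaps with
  | nil => simp [pvMx, pvBmask]
  | cons x r => simp [pvMx, ← pvMx_true_eq opn (x :: r) (by simp)]

theorem pvFx_true_eq : ∀ (gaps : List (List Char)), pvFx true [] gaps = pvBfeats gaps := by
  intro gaps
  induction gaps using pvBfeats.induct with
  | case1 => simp [pvFx, pvBfeats]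
  | case2 x => simp [pvFx, pvBfeats]
  | case3 x y r ih =>
    cases r with
    | nil => simp [pvFx, pvBfeats]
    | cons z r' => simp [pvFx, pvBfeats, ← ih]

theorem pvFx_false_eq (cur p : List Char) (gaps : List (List Char)) :
    pvFx false cur (p :: gaps) = pvBfeats gaps := by
  cases gaps with
  | nil => simp [pvFx, pvBfeats]
  | cons x r => simpa [pvFx] using pvFx_true_eq (x :: r)

-- the main loop invariant: A's fold over the remaining characters, described by pvSplit
theorem pvMain (bm opn : List Char) : ∀ (rest : List Char) (s : Nat) (feats : List (List Char))
    (mask : List Char) (b : Bool) (bp ep : Int) (cur : List Char),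
    bm.drop s = rest →
    (b = true → ∃ p : Nat, bp = (p : Int) ∧ bm.drop (p + 1) = cur ++ rest ∧ p + 1 + cur.length = s) →
    ((PySem.List.enumerate rest (s : Int)).foldl (pvAStep bm opn) (feats, b, false, bp, ep, mask)).1
        = feats ++ pvFx b cur (pvSplit rest) ∧
    ((PySem.List.enumerate rest (s : Int)).foldl (pvAStep bm opn) (feats, b, false, bp, ep, mask)).2.2.2.2.2
        = mask ++ pvMx opn b (pvSplit rest) := by
  intro rest
  induction rest with
  | nil =>
    intro s feats mask b bp ep cur _ _
    simp [PySem.List.enumerate_nil, pvSplit, pvFx, pvMx]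
  | cons c rest' ih =>
    intro s feats mask b bp ep cur hdrop hb
    have hdrop' : bm.drop (s + 1) = rest' := by
      have h1 : bm.drop (s + 1) = List.drop 1 (bm.drop s) := by
        rw [List.drop_drop]
      rw [h1, hdrop]; rfl
    have hcast : (s : Int) + 1 = ((s + 1 : Nat) : Int) := by push_cast; ring
    rw [PySem.List.enumerate_cons, List.foldl_cons, hcast]
    by_cases hc : c = ' '
    · subst hc
      cases b with
      | false =>
        have hstep : pvAStep bm opn (feats, false, false, bp, ep, mask) ((s : Int), ' ')
            = (feats, true, false, (s : Int), ep, mask ++ opn) := by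
          simp [pvAStep, PySem.List.slice_to_neg_one]
        rw [hstep]
        obtain ⟨h1, h2⟩ := ih (s + 1) feats (mask ++ opn) true ((s : Int)) ep []
          hdrop' (by intro _; exact ⟨s, rfl, by simpa using hdrop', by simp⟩)
        have hs' : pvSplit (' ' :: rest') = [] :: pvSplit rest' := by simp [pvSplit]
        cases hparts : pvSplit rest' with
        | nil => exact absurd hparts (pvSplit_ne_nil rest')
        | cons hd tl =>
          constructor
          · rw [h1, hs', hparts]; simp [pvFx]
          · rw [h2, hs', hparts]; simp [pvMx]
      | true =>
        obtain ⟨p, hbp, hdropp, hlen⟩ := hb rfl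
        have hfeat : PySem.List.slice bm (some (bp + 1)) (some ((s : Int))) = cur := by
          have hp1 : bp + 1 = ((p + 1 : Nat) : Int) := by rw [hbp]; push_cast; ring
          rw [hp1, PySem.List.slice_natCast, hdropp]
          have : s - (p + 1) = cur.length := by omega
          rw [this, List.take_left]
        have hstep : pvAStep bm opn (feats, true, false, bp, ep, mask) ((s : Int), ' ')
            = (feats ++ [cur], false, false, bp, (s : Int), mask ++ "']".toList) := by
          simp [pvAStep, PySem.List.slice_to_neg_one, hfeat]
        rw [hstep]
        obtain ⟨h1, h2⟩ := ih (s + 1) (feats ++ [cur]) (mask ++ "']".toList) false bp ((s : Int)) []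
          hdrop' (by intro h; exact absurd h (by simp))
        have hs' : pvSplit (' ' :: rest') = [] :: pvSplit rest' := by simp [pvSplit]
        cases hparts : pvSplit rest' with
        | nil => exact absurd hparts (pvSplit_ne_nil rest')
        | cons hd tl =>
          constructor
          · rw [h1, hs', hparts]; simp [pvFx]
          · rw [h2, hs', hparts]; simp [pvMx]
    · have hstep : pvAStep bm opn (feats, b, false, bp, ep, mask) ((s : Int), c)
          = (feats, b, false, bp, ep, mask ++ [c]) := by
        cases b <;> simp [pvAStep, hc]
      rw [hstep]
      obtain ⟨h1, h2⟩ := ih (s + 1) feats (mask ++ [c]) b bp ep (cur ++ [c])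
        hdrop'
        (by
          intro hbt
          obtain ⟨p, hbp, hdropp, hlen⟩ := hb hbt
          exact ⟨p, hbp, by rw [hdropp]; simp, by simp; omega⟩)
      cases hparts : pvSplit rest' with
      | nil => exact absurd hparts (pvSplit_ne_nil rest')
      | cons hd tl =>
        have hs' : pvSplit (c :: rest') = (c :: hd) :: tl := by
          simp [pvSplit, hc, hparts]
        constructor
        · rw [h1, hs', hparts]
          cases b with
          | false => cases tl <;> simp [pvFx]
          | true => cases tl <;> simp [pvFx]
        · rw [h2, hs', hparts]
          cases tl <;> cases b <;> simp [pvMx]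

-- ===== VERDICT (by name: the statement is the Claim_ definition above) =====
theorem add_preselection_df_prefix_spec : Claim_equal_add_preselection_df_prefix := by
  unfold Claim_equal_add_preselection_df_prefix Spec_add_preselection_df_prefix
  intro boolean_mask prefix_ _
  unfold add_preselection_df_prefix add_preselection_df_prefix_alt
  obtain ⟨h1, h2⟩ := pvMain boolean_mask.toList ("self.".toList ++ prefix_.toList ++ "['".toList)
    boolean_mask.toList 0 [] [] false 0 0 [] (by simp) (by intro h; exact absurd h (by simp))
  rw [pvSplitOn_eq]
  cases hs : pvSplit boolean_mask.toList with
  | nil => exact absurd hs (pvSplit_ne_nil _)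
  | cons first gaps =>
    dsimp only
    rw [pvBLoop_eq]
    simp only [Nat.cast_zero] at h1 h2
    rw [hs] at h1 h2
    rw [h1, h2, pvMx_false_eq, pvFx_false_eq]
    simp
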